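-- pv_equiv track=rewrite | github.com/leiyuan1989/ipmigration | ipmigration/cell/apr/pr/pattern_apr.py | process_nets
-- ===== SOURCE A (Python) =====
-- from collections import OrderedDict
--
-- def process_nets(data):
--     """处理原始数据，生成按x坐标排序的点集合"""
--     x_coordinate_dict = {}
--
--     # 遍历每个网络和对应的坐标点
--     for net, points in data.items():
--         for point in points:
--             x, y, z = point
--             # 如果x坐标尚未作为键存在，创建新列表
--             if x not in x_coordinate_dict:
--                 x_coordinate_dict[x] = []
--             # 添加点信息到对应x坐标的列表中
--             x_coordinate_dict[x].append([net, point])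
--
--     # 对每个x坐标下的点按y值从小到大排序
--     for x in x_coordinate_dict:
--         x_coordinate_dict[x].sort(key=lambda p: p[1][1])
--
--     # 确定x坐标的范围
--     if x_coordinate_dict:
--         min_x = min(x_coordinate_dict.keys())
--         max_x = max(x_coordinate_dict.keys())
--         # 确保从min_x到max_x的每个整数x都在字典中，没有pin的x对应空列表
--         for x in range(min_x, max_x + 1):
--             if x not in x_coordinate_dict:
--                 x_coordinate_dict[x] = []
--
--     # 按x坐标从小到大排序字典
--     sorted_x = sorted(x_coordinate_dict.keys())
--     x_coordinate_dict = OrderedDict((x, x_coordinate_dict[x]) for x in sorted_x)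
--
--     return x_coordinate_dict
-- ===== SOURCE B (Python) =====
-- from collections import OrderedDict
--
-- def process_nets(data):
--     """处理原始数据，生成按x坐标排序的点集合"""
--     # Flatten every (net, point) pair once.
--     pairs = [(net, pt) for net, pts in data.items() for pt in pts]
--     # Distinct x coordinates in ascending order.
--     xs = sorted({pt[0] for _, pt in pairs})
--     # Every integer x between min and max, ascending; empty if there are no points.
--     keys = range(xs[0], xs[-1] + 1) if xs else []
--     # One bucket per key: the pairs with that x, stably sorted by y.
--     return OrderedDict(
--         (x, sorted(([net, pt] for net, pt in pairs if pt[0] == x),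
--                    key=lambda q: q[1][1]))
--         for x in keys)
-- ===== Notes on version B (the rewrite author's own statement) =====
-- stated objective: simpler
-- what changed: B replaces A's mutable dict accumulation, per-bucket in-place sorts, gap-filling insertion pass and final key sort with a single flatten of (net, point) pairs plus, for each integer x in range(min_x, max_x+1), one filter-and-stable-sort comprehension building the OrderedDict directly in ascending key order.
import Mathlib
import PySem

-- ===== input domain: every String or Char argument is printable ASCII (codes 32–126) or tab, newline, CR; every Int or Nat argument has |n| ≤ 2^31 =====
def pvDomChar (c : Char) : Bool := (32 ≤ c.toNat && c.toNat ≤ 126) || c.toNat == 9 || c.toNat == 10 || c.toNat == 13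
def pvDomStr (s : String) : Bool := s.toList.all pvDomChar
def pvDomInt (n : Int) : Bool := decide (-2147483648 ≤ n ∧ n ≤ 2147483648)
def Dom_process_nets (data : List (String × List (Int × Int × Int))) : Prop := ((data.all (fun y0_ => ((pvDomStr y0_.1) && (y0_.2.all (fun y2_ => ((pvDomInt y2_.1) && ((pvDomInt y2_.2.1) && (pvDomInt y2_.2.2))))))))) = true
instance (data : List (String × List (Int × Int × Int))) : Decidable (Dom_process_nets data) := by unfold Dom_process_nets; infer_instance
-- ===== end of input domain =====

-- B groups by x via one flatten + per-key filter/sort over an explicit integer range instead of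
-- A's mutable dict accumulation, per-bucket in-place sorts, gap-filling pass and final key sort;
-- objective: simpler (same return value, plainer decomposition).

-- the dict argument as Python sees it: insertion order with overwrite (last value wins)
def pvNorm (data : List (String × List (Int × Int × Int))) : List (String × List (Int × Int × Int)) :=
  (data.foldl (fun d kv => d.insert kv.1 kv.2) (PySem.Dict.empty)).items

-- sort key `lambda p: p[1][1]` (the y coordinate of the point)
def pvKeyY (p : String × (Int × Int × Int)) : Int := p.2.2.1

-- ===== PORT A =====
def process_nets (data : List (String × List (Int × Int × Int))) : List (Int × List (String × (Int × Int × Int))) :=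
  -- `if x not in d: d[x] = []` then `d[x].append([net, point])`, over each net's points
  let d1 : PySem.Dict Int (List (String × (Int × Int × Int))) :=
    (pvNorm data).foldl (fun d nv =>
      nv.2.foldl (fun d pt =>
        let d' := if d.contains pt.1 then d else d.insert pt.1 []
        d'.modify pt.1 [] (fun l => l ++ [(nv.1, pt)])) d)
      PySem.Dict.empty
  -- `for x in d: d[x].sort(key=lambda p: p[1][1])`
  let d2 := d1.keys.foldl (fun d x => d.modify x [] (fun l => PySem.List.sorted l pvKeyY)) d1
  -- `if x_coordinate_dict:` fill every x from min to max
  let d3 :=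
    if d2.size ≠ 0 then
      match PySem.List.min? d2.keys (fun x => x), PySem.List.max? d2.keys (fun x => x) with
      | some mn, some mx =>
          (PySem.List.pyRange mn (mx + 1) 1).foldl
            (fun d x => if d.contains x then d else d.insert x []) d2
      | _, _ => d2
    else d2
  -- OrderedDict over the sorted keys
  (PySem.List.sorted d3.keys (fun x => x)).map (fun x => (x, d3.getD x []))

-- ===== PORT B =====
def process_nets_alt (data : List (String × List (Int × Int × Int))) : List (Int × List (String × (Int × Int × Int))) :=
  let pairs := (pvNorm data).flatMap (fun nv => nv.2.map (fun pt => (nv.1, pt)))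
  let xs := PySem.List.sorted (PySem.Set.ofList (pairs.map (fun q => q.2.1))) (fun x => x)
  let keys := if xs.isEmpty then []
    else PySem.List.pyRange (PySem.List.pyGetD xs 0 0) (PySem.List.pyGetD xs (-1) 0 + 1) 1
  keys.map (fun x => (x, PySem.List.sorted (pairs.filter (fun q => q.2.1 == x)) pvKeyY))

-- ===== PRECONDITION & SPEC =====
def Spec_process_nets (data : List (String × List (Int × Int × Int))) (out : List (Int × List (String × (Int × Int × Int)))) : Prop := out = process_nets_alt data
instance (data : List (String × List (Int × Int × Int))) (out : List (Int × List (String × (Int × Int × Int)))) : Decidable (Spec_process_nets data out) := by unfold Spec_process_nets; infer_instance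

-- ===== CLAIM (what is proved, stated in full; the proofs are below) =====
def Claim_equal_process_nets : Prop := ∀ (data : List (String × List (Int × Int × Int))), Dom_process_nets data → Spec_process_nets data (process_nets data)

-- ===== LEMMAS AND PROOFS =====

-- `if x not in d: d[x] = []; d[x].append(v)` is a single modify
theorem pv_step_modify {ν : Type} (d : PySem.Dict Int (List ν)) (k : Int) (f : List ν → List ν) :
    (if d.contains k then d else d.insert k []).modify k [] f = d.modify k [] f := by
  by_cases h : d.contains k
  · simp [h]
  · have h' : d.contains k = false := by simpa using h
    simp [h', PySem.Dict.modify, PySem.Dict.getD_insert_self,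
      PySem.Dict.insert_insert_self, PySem.Dict.getD_of_not_contains (h := h')]

-- A's nested per-net accumulation is one modify-fold over the flattened (net, point) pairs
theorem pv_d1_eq (l : List (String × List (Int × Int × Int)))
    (init : PySem.Dict Int (List (String × (Int × Int × Int)))) :
    l.foldl (fun d nv =>
        nv.2.foldl (fun d pt =>
          let d' := if d.contains pt.1 then d else d.insert pt.1 []
          d'.modify pt.1 [] (fun l => l ++ [(nv.1, pt)])) d) init
      = (l.flatMap (fun nv => nv.2.map (fun pt => (nv.1, pt)))).foldl
          (fun d p => d.modify p.2.1 [] (fun l => l ++ [p])) init := by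
  induction l generalizing init with
  | nil => rfl
  | cons nv t ih =>
    simp only [List.foldl_cons, List.flatMap_cons, List.foldl_append, List.foldl_map]
    rw [ih]
    simp only [pv_step_modify]

-- fold of modify over a nodup key list: each present key gets f applied exactly once
theorem pv_getD_foldl_modify {ν : Type} (ks : List Int) (hnd : ks.Nodup)
    (f : List ν → List ν) (d : PySem.Dict Int (List ν)) (c : Int) :
    (ks.foldl (fun d x => d.modify x [] f) d).getD c []
      = if c ∈ ks then f (d.getD c []) else d.getD c [] := by
  induction ks generalizing d with
  | nil => simp
  | cons x t ih =>
    rcases List.nodup_cons.mp hnd with ⟨hx, hnd'⟩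
    by_cases hc : c = x
    · subst hc
      simp only [List.foldl_cons, ih hnd', if_neg hx, PySem.Dict.getD_modify_self,
        List.mem_cons, true_or, if_pos]
    · simp only [List.foldl_cons, ih hnd', PySem.Dict.getD_modify_of_ne _ _ _ hc,
        List.mem_cons, hc, false_or]

-- the gap-filling loop never changes any `getD · []`
theorem pv_getD_foldl_fill {ν : Type} (l : List Int) (d : PySem.Dict Int (List ν)) (c : Int) :
    (l.foldl (fun d x => if d.contains x then d else d.insert x []) d).getD c []
      = d.getD c [] := by
  induction l generalizing d with
  | nil => rfl
  | cons x t ih =>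
    simp only [List.foldl_cons, ih]
    by_cases h : d.contains x
    · simp [h]
    · by_cases hc : c = x
      · subst hc
        simp [h, PySem.Dict.getD_insert_self,
          PySem.Dict.getD_of_not_contains (h := by simpa using h)]
      · have h' : d.contains x = false := by simpa using h
        simp only [h', Bool.false_eq_true, if_false]
        exact PySem.Dict.getD_insert_of_ne d [] [] hc

-- keys after the gap-filling loop: membership is the union
theorem pv_mem_keys_foldl_fill {ν : Type} (l : List Int) (d : PySem.Dict Int (List ν)) (c : Int) :
    c ∈ (l.foldl (fun d x => if d.contains x then d else d.insert x ([] : List ν)) d).keys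
      ↔ c ∈ d.keys ∨ c ∈ l := by
  induction l generalizing d with
  | nil => simp
  | cons x t ih =>
    by_cases h : d.contains x
    · simp only [List.foldl_cons, h, if_true, ih, List.mem_cons]
      constructor
      · rintro (hk | ht) <;> tauto
      · rintro (hk | hc | ht)
        · tauto
        · subst hc; exact Or.inl ((PySem.Dict.contains_iff_mem_keys _ _).mp h)
        · tauto
    · have h' : d.contains x = false := by simpa using h
      simp only [List.foldl_cons, h', Bool.false_eq_true, if_false, ih,
        PySem.Dict.mem_keys_insert, List.mem_cons]
      tauto

-- keys stay nodup through the gap-filling loop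
theorem pv_nodup_keys_foldl_fill {ν : Type} (l : List Int) (d : PySem.Dict Int (List ν))
    (h : d.keys.Nodup) :
    (l.foldl (fun d x => if d.contains x then d else d.insert x ([] : List ν)) d).keys.Nodup := by
  induction l generalizing d with
  | nil => exact h
  | cons x t ih =>
    by_cases hx : d.contains x
    · simpa [hx] using ih d h
    · simp only [List.foldl_cons, hx]
      exact ih _ (PySem.Dict.nodup_keys_insert d x [] h)

-- updating a set with elements it already has changes nothing
theorem pv_update_self (s xs : List Int) (h : ∀ x ∈ xs, x ∈ s) :
    PySem.Set.update s xs = s := by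
  induction xs generalizing s with
  | nil => rfl
  | cons x t ih =>
    have hx0 : x ∈ s := h x (by simp)
    have hcon : s.contains x = true := by simpa using hx0
    have hx : PySem.Set.add s x = s := by simp [PySem.Set.add, hx0]
    simp only [PySem.Set.update, List.foldl_cons]
    rw [show List.foldl PySem.Set.add (PySem.Set.add s x) t
          = PySem.Set.update (PySem.Set.add s x) t from rfl, hx]
    exact ih s (fun y hy => h y (by simp [hy]))

-- a ≤-sorted list's last element bounds every member
theorem pv_le_getLast (l : List Int) (hp : l.Pairwise (· ≤ ·)) (hne : l ≠ []) :
    ∀ y ∈ l, y ≤ l.getLast hne := by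
  induction l with
  | nil => simp at hne
  | cons x t ih =>
    rcases List.pairwise_cons.mp hp with ⟨hx, hp'⟩
    intro y hy
    rcases List.mem_cons.mp hy with rfl | hy
    · cases t with
      | nil => simp
      | cons a s =>
        calc y ≤ a := hx a (by simp)
          _ ≤ _ := by
            have := ih hp' (by simp) a (by simp)
            simpa [List.getLast] using this
    · cases t with
      | nil => simp at hy
      | cons a s =>
        have := ih hp' (by simp) y (by simpa using hy)
        simpa [List.getLast] using this

-- the heart of the equivalence, over the flattened pair list
theorem pv_core (pairs : List (String × (Int × Int × Int))) :
    (let d1 := pairs.foldl (fun d p => d.modify p.2.1 [] (fun l => l ++ [p])) PySem.Dict.empty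
     let d2 := d1.keys.foldl (fun d x => d.modify x [] (fun l => PySem.List.sorted l pvKeyY)) d1
     let d3 :=
       if d2.size ≠ 0 then
         match PySem.List.min? d2.keys (fun x => x), PySem.List.max? d2.keys (fun x => x) with
         | some mn, some mx =>
             (PySem.List.pyRange mn (mx + 1) 1).foldl
               (fun d x => if d.contains x then d else d.insert x []) d2
         | _, _ => d2
       else d2
     (PySem.List.sorted d3.keys (fun x => x)).map (fun x => (x, d3.getD x [])))
    = (let xs := PySem.List.sorted (PySem.Set.ofList (pairs.map (fun q => q.2.1))) (fun x => x)
       let keys := if xs.isEmpty then []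
         else PySem.List.pyRange (PySem.List.pyGetD xs 0 0) (PySem.List.pyGetD xs (-1) 0 + 1) 1
       keys.map (fun x => (x, PySem.List.sorted (pairs.filter (fun q => q.2.1 == x)) pvKeyY))) := by
  dsimp only
  set d1 := pairs.foldl (fun d p => d.modify p.2.1 [] (fun l => l ++ [p])) PySem.Dict.empty with hd1
  set d2 := d1.keys.foldl (fun d x => d.modify x [] (fun l => PySem.List.sorted l pvKeyY)) d1 with hd2
  set s := PySem.List.sorted (PySem.Set.ofList (pairs.map (fun q => q.2.1))) (fun x => x) with hs
  -- the first loop builds, at each key, exactly the pairs with that x, in encounter order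
  have hK1 : d1.keys = PySem.Set.ofList (pairs.map (fun q => q.2.1)) := by
    rw [hd1]
    have h := PySem.Dict.keys_foldl_modify_key pairs (fun p => p.2.1) []
      (fun _ p => fun l => l ++ [p]) PySem.Dict.empty
    simpa [PySem.Dict.keys_empty, PySem.Set.update_nil_left] using h
  have hnd1 : d1.keys.Nodup := by rw [hK1]; exact PySem.Set.nodup_ofList _
  have hget1 : ∀ c, d1.getD c [] = pairs.filter (fun q => q.2.1 == c) := by
    intro c
    rw [hd1]
    have h := PySem.Dict.getD_foldl_modify_append (pairs.map (fun p => (p.2.1, p)))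
      PySem.Dict.empty c
    rw [List.foldl_map] at h
    simpa [List.filter_map, Function.comp_def, PySem.Dict.getD_empty] using h
  have hfilter_nil : ∀ c, c ∉ d1.keys → pairs.filter (fun q => q.2.1 == c) = [] := by
    intro c hc
    rw [hK1, PySem.Set.mem_ofList] at hc
    refine List.filter_eq_nil_iff.mpr (fun q hq => ?_)
    simp only [beq_iff_eq]
    intro h
    exact hc (h ▸ List.mem_map_of_mem hq)
  -- after the second loop every bucket is its y-sorted filter
  have hget2 : ∀ c, d2.getD c [] = PySem.List.sorted (pairs.filter (fun q => q.2.1 == c)) pvKeyY := by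
    intro c
    rw [hd2, pv_getD_foldl_modify _ hnd1]
    by_cases hc : c ∈ d1.keys
    · rw [if_pos hc, hget1]
    · rw [if_neg hc, hget1, hfilter_nil c hc]
      exact ((PySem.List.sorted_eq_nil_iff _ _ _).mpr rfl).symm
  have hK2 : d2.keys = d1.keys := by
    rw [hd2]
    have h := PySem.Dict.keys_foldl_modify_key d1.keys (fun x => x) []
      (fun _ _ => fun l => PySem.List.sorted l pvKeyY) d1
    rw [List.map_id'] at h
    rw [h, pv_update_self _ _ (fun x hx => hx)]
  by_cases hp : pairs = []
  · subst hp; rfl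
  · obtain ⟨q, hq⟩ := List.exists_mem_of_ne_nil pairs hp
    have hkne : d1.keys ≠ [] := by
      intro h0
      have : q.2.1 ∈ d1.keys := by
        rw [hK1, PySem.Set.mem_ofList]; exact List.mem_map_of_mem hq
      rw [h0] at this; simp at this
    have hk2ne : d2.keys ≠ [] := by rw [hK2]; exact hkne
    have hsize : d2.size ≠ 0 := by
      have hlen : d2.keys.length ≠ 0 := by
        simpa using List.length_pos_of_ne_nil hk2ne |>.ne'
      simpa [PySem.Dict.keys, PySem.Dict.size] using hlen
    rcases hmn' : PySem.List.min? d2.keys (fun x => x) with _ | mn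
    · rw [PySem.List.min?_eq_none_iff] at hmn'; exact absurd hmn' hk2ne
    rcases hmx' : PySem.List.max? d2.keys (fun x => x) with _ | mx
    · rw [PySem.List.max?_eq_none_iff] at hmx'; exact absurd hmx' hk2ne
    rw [if_pos hsize]
    dsimp only
    set d3 := (PySem.List.pyRange mn (mx + 1) 1).foldl
      (fun d x => if d.contains x then d else d.insert x []) d2 with hd3
    -- B's sorted distinct x's are the sorted keys
    have hs' : s = PySem.List.sorted d2.keys (fun x => x) := by rw [hK2, hK1, hs]
    have hslt : s.Pairwise (· < ·) := by rw [hs]; exact PySem.List.sorted_ofList_pairwise_lt _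
    have hsne : s ≠ [] := by
      rw [hs', Ne, PySem.List.sorted_eq_nil_iff]; exact hk2ne
    have hsmem : ∀ y, y ∈ s ↔ y ∈ d2.keys := by
      intro y; rw [hs']; exact PySem.List.mem_sorted _ _ _ _
    -- head of s is the min key, last of s is the max key
    rcases hsc : s with _ | ⟨m, st⟩
    · exact absurd hsc hsne
    have hm_eq : m = mn := by
      have h1 : ∀ y ∈ d2.keys, m ≤ y := PySem.List.key_head_sorted_le d2.keys (fun x => x) (hs' ▸ hsc)
      have h2 : m ∈ d2.keys := (hsmem m).mp (hsc ▸ List.mem_cons_self)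
      exact le_antisymm (h1 mn (PySem.List.min?_mem hmn')) (PySem.List.min?_isMin hmn' m h2)
    have hL_eq : (m :: st).getLast (by simp) = mx := by
      have hle : ∀ y ∈ s, y ≤ s.getLast hsne :=
        pv_le_getLast s (hslt.imp le_of_lt) hsne
      have hLmem : s.getLast hsne ∈ d2.keys := (hsmem _).mp (List.getLast_mem hsne)
      have h2 : (m :: st).getLast (by simp) = s.getLast hsne := by
        congr 1; rw [hsc]
      rw [h2]
      exact le_antisymm (PySem.List.max?_isMax hmx' _ hLmem)
        (hle mx ((hsmem mx).mpr (PySem.List.max?_mem hmx')))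
    -- keys of the filled dict, sorted, are exactly range(mn, mx+1)
    have h3nd : d3.keys.Nodup := pv_nodup_keys_foldl_fill _ _ (hK2 ▸ hnd1)
    have h3mem : ∀ c, c ∈ d3.keys ↔ c ∈ PySem.List.pyRange (mn + 1 - 1) (mx + 1) 1 := by
      intro c
      rw [show mn + 1 - 1 = mn by ring, hd3, pv_mem_keys_foldl_fill]
      constructor
      · rintro (hc | hc)
        · exact PySem.List.mem_pyRange_one.mpr
            ⟨PySem.List.min?_isMin hmn' c hc,
             lt_of_le_of_lt (PySem.List.max?_isMax hmx' c hc) (by omega)⟩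
        · exact hc
      · exact Or.inr
    have hsorted3 : PySem.List.sorted d3.keys (fun x => x) = PySem.List.pyRange mn (mx + 1) 1 := by
      refine PySem.List.sorted_eq_of_perm_of_pairwise_lt _ _ _ ?_ (PySem.List.pairwise_lt_pyRange_one _ _)
      refine (List.perm_ext_iff_of_nodup (PySem.List.nodup_pyRange_one _ _) h3nd).mpr (fun a => ?_)
      rw [h3mem a, show mn + 1 - 1 = mn by ring]
    -- assemble
    rw [hsorted3, if_neg (by simp)]
    have hg0 : PySem.List.pyGetD (m :: st) 0 0 = mn := by
      rw [PySem.List.pyGetD_zero]; exact hm_eq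
    have hgL : PySem.List.pyGetD (m :: st) (-1) 0 = mx := by
      rw [PySem.List.pyGetD_neg_one (m :: st) 0 (by simp)]
      exact hL_eq
    rw [hg0, hgL]
    refine List.map_congr_left (fun x _ => ?_)
    rw [hd3, pv_getD_foldl_fill, hget2]

-- ===== VERDICT (by name: the statement is the Claim_ definition above) =====
theorem process_nets_spec : Claim_equal_process_nets := by
  intro data _h
  unfold Spec_process_nets
  show process_nets data = process_nets_alt data
  unfold process_nets process_nets_alt
  rw [pv_d1_eq]
  exact pv_core _
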